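-- pv_equiv track=rewrite | github.com/crptcusco/cbn_neuroscience | examples/attractor_correspondence.py | generate_transition_matrix
-- ===== SOURCE A (Python) =====
-- from collections import defaultdict
--
-- def generate_transition_matrix(state_sequence):
--     """Genera una matriz de transición empírica (tabla de verdad) a partir de una secuencia de estados."""
--     transitions = defaultdict(lambda: defaultdict(int))
--     for i in range(len(state_sequence) - 1):
--         from_state = tuple(state_sequence[i])
--         to_state = tuple(state_sequence[i+1])
--         transitions[from_state][to_state] += 1
--
--     # Formatear para una salida legible
--     matrix = {}
--     for from_state, to_states in transitions.items():
--         # Tomar la transición más frecuente como la canónica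
--         most_likely_to_state = max(to_states, key=to_states.get)
--         matrix[from_state] = most_likely_to_state
--     return matrix
-- ===== SOURCE B (Python) =====
-- def generate_transition_matrix(state_sequence):
--     """Genera una matriz de transición empírica (tabla de verdad) a partir de una secuencia de estados."""
--     # No counting structures at all: for each from-state, on first sight, gather its
--     # successor list and brute-force the argmax with list.count (first maximum wins).
--     pairs = [(tuple(a), tuple(b)) for a, b in zip(state_sequence, state_sequence[1:])]
--     matrix = {}
--     for f, _ in pairs:
--         if f not in matrix:
--             succs = [t for g, t in pairs if g == f]
--             best = succs[0]
--             for t in succs[1:]: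
--                 if succs.count(t) > succs.count(best):
--                     best = t
--             matrix[f] = best
--     return matrix
-- ===== Notes on version B (the rewrite author's own statement) =====
-- stated objective: alternative
-- what changed: Drops A's counting structures entirely: instead of nested defaultdict counters plus max(key=get), B makes one pass over the consecutive pairs and, at the first sight of each from-state, gathers its successor list by filtering and brute-forces the argmax with list.count under a strict '>' so the first maximum wins.
import Mathlib
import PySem

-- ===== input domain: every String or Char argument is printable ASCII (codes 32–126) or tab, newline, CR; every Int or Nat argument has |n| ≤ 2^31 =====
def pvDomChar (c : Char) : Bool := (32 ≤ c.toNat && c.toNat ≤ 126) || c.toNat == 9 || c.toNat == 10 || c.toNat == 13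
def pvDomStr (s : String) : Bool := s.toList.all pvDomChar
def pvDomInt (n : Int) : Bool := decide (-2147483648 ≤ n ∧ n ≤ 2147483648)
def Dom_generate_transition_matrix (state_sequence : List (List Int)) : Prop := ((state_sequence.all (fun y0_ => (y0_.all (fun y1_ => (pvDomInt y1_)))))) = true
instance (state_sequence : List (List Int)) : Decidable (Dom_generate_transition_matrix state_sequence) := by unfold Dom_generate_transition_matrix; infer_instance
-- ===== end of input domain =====

-- B drops A's counting structures entirely: at the first sight of each from-state it filters out
-- that state's successor list and brute-forces the argmax with list.count (objective: alternative).

-- ===== PORT A =====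
-- Python's max(to_states, key=to_states.get) iterates the inner dict's keys; to_states.get t equals
-- to_states.getD t 0 on every key, and the inner dict is never empty so maxD's default [] is unreachable.
-- xs[i] / xs[i+1] for i in range(len(xs)-1) are always in range, so pyGetD's default [] is unreachable too.
def generate_transition_matrix (state_sequence : List (List Int)) : List (List Int × List Int) :=
  let transitions : PySem.Dict (List Int) (PySem.Dict (List Int) Int) :=
    (PySem.List.pyRange 0 ((state_sequence.length : Int) - 1)).foldl
      (fun d i =>
        let from_state := PySem.List.pyGetD state_sequence i []
        let to_state := PySem.List.pyGetD state_sequence (i + 1) []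
        d.modify from_state PySem.Dict.empty (fun inner => inner.modify to_state 0 (· + 1)))
      PySem.Dict.empty
  let matrix : PySem.Dict (List Int) (List Int) :=
    transitions.items.foldl
      (fun m p => m.insert p.1 (PySem.List.maxD p.2.keys (fun t => p.2.getD t 0) []))
      PySem.Dict.empty
  matrix.items

-- ===== PORT B =====
-- succs is never empty (the pair itself is in it), so pyGetD's default [] for succs[0] is unreachable.
def generate_transition_matrix_alt (state_sequence : List (List Int)) : List (List Int × List Int) :=
  let pairs := state_sequence.zip (PySem.List.slice state_sequence (some 1) none)
  let matrix : PySem.Dict (List Int) (List Int) :=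
    pairs.foldl
      (fun m p =>
        if m.contains p.1 then m
        else
          let succs := pairs.filterMap (fun q => if q.1 = p.1 then some q.2 else none)
          let best :=
            (PySem.List.slice succs (some 1) none).foldl
              (fun b t => if PySem.List.count succs b < PySem.List.count succs t then t else b)
              (PySem.List.pyGetD succs 0 [])
          m.insert p.1 best)
      PySem.Dict.empty
  matrix.items

-- ===== PRECONDITION & SPEC =====
def Spec_generate_transition_matrix (state_sequence : List (List Int)) (out : List (List Int × List Int)) : Prop := out = generate_transition_matrix_alt state_sequence
instance (state_sequence : List (List Int)) (out : List (List Int × List Int)) : Decidable (Spec_generate_transition_matrix state_sequence out) := by unfold Spec_generate_transition_matrix; infer_instance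

-- ===== CLAIM (what is proved, stated in full; the proofs are below) =====
def Claim_equal_generate_transition_matrix : Prop := ∀ (state_sequence : List (List Int)), Dom_generate_transition_matrix state_sequence → Spec_generate_transition_matrix state_sequence (generate_transition_matrix state_sequence)

-- ===== LEMMAS AND PROOFS =====

-- ---- shared: the list of consecutive pairs and the successors of a from-state ----

def pvNestedStep (d : PySem.Dict (List Int) (PySem.Dict (List Int) Int))
    (p : List Int × List Int) : PySem.Dict (List Int) (PySem.Dict (List Int) Int) :=
  d.modify p.1 PySem.Dict.empty (fun inner => inner.modify p.2 0 (· + 1))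

def pvTos (ps : List (List Int × List Int)) (f : List Int) : List (List Int) :=
  ps.filterMap (fun p => if p.1 = f then some p.2 else none)

lemma pvNested_getD (ps : List (List Int × List Int)) :
    ∀ (d : PySem.Dict (List Int) (PySem.Dict (List Int) Int)) (f : List Int),
    (ps.foldl pvNestedStep d).getD f PySem.Dict.empty
      = (pvTos ps f).foldl (fun inner t => inner.modify t 0 (· + 1)) (d.getD f PySem.Dict.empty) := by
  induction ps with
  | nil => intro d f; simp [pvTos]
  | cons p ps ih =>
    intro d f
    rw [List.foldl_cons, ih]
    by_cases h : p.1 = f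
    · subst h
      have hinit : (pvNestedStep d p).getD p.1 PySem.Dict.empty
          = (d.getD p.1 PySem.Dict.empty).modify p.2 0 (· + 1) := by
        unfold pvNestedStep
        rw [PySem.Dict.getD_modify, if_pos rfl]
      rw [hinit]
      have htos : pvTos (p :: ps) p.1 = p.2 :: pvTos ps p.1 := by
        simp [pvTos]
      rw [htos, List.foldl_cons]
    · have hinit : (pvNestedStep d p).getD f PySem.Dict.empty = d.getD f PySem.Dict.empty := by
        unfold pvNestedStep
        rw [PySem.Dict.getD_modify, if_neg (fun hh => h hh.symm)]
      have htos : pvTos (p :: ps) f = pvTos ps f := by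
        simp [pvTos, h]
      rw [hinit, htos]

lemma pvNested_items (ps : List (List Int × List Int)) :
    (ps.foldl pvNestedStep PySem.Dict.empty).items
      = (PySem.Set.ofList (ps.map Prod.fst)).map (fun f => (f, PySem.Dict.counter (pvTos ps f))) := by
  have hfold : List.foldl pvNestedStep
      = List.foldl (fun (d : PySem.Dict (List Int) (PySem.Dict (List Int) Int))
          (x : List Int × List Int) =>
            d.modify ((fun (p : List Int × List Int) => p.1) x) PySem.Dict.empty
              ((fun (_ : PySem.Dict (List Int) (PySem.Dict (List Int) Int))
                  (p : List Int × List Int) =>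
                 fun inner => inner.modify p.2 0 (· + 1)) d x)) := rfl
  have hnodup : (ps.foldl pvNestedStep PySem.Dict.empty).keys.Nodup := by
    rw [hfold]
    exact PySem.Dict.nodup_keys_foldl_modify_key ps _ _ _ PySem.Dict.empty
      (by rw [PySem.Dict.keys_empty]; exact List.nodup_nil)
  have hkeys : (ps.foldl pvNestedStep PySem.Dict.empty).keys = PySem.Set.ofList (ps.map Prod.fst) := by
    rw [hfold, PySem.Dict.keys_foldl_modify_key, PySem.Dict.keys_empty, PySem.Set.update_nil_left]
  rw [PySem.Dict.items_eq_map_keys _ hnodup PySem.Dict.empty, hkeys]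
  apply List.map_congr_left
  intro f _
  rw [pvNested_getD, PySem.Dict.getD_empty, PySem.Dict.counter_eq_foldl]

lemma pv_zip_eq (zs : List (List Int)) :
    zs.zip (zs.drop 1)
      = (List.range (zs.length - 1)).map
          (fun (k : Nat) => (PySem.List.pyGetD zs ((k : Int)) [], PySem.List.pyGetD zs ((k : Int) + 1) [])) := by
  apply List.ext_getElem
  · simp [List.length_zip]
  · intro i h1 h2
    simp only [List.length_zip, List.length_drop] at h1
    have hi1 : i < zs.length - 1 := by omega
    have h3 : ((i : Int)) + 1 = ((i + 1 : Nat) : Int) := by push_cast; ring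
    simp only [List.getElem_zip, List.getElem_map, List.getElem_range, List.getElem_drop, h3,
      PySem.List.pyGetD_natCast]
    rw [List.getD_eq_getElem _ _ (by omega), List.getD_eq_getElem _ _ (by omega)]
    simp [Nat.add_comm]

lemma pv_pairs_loop {β : Type} (xs : List (List Int)) (g : β → List Int × List Int → β) (init : β) :
    (PySem.List.pyRange 0 ((xs.length : Int) - 1)).foldl
        (fun d i => g d (PySem.List.pyGetD xs i [], PySem.List.pyGetD xs (i + 1) [])) init
      = (xs.zip (xs.drop 1)).foldl g init := by
  cases xs with
  | nil => simp [PySem.List.pyRange]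
  | cons y ys =>
    have hlen : (((y :: ys).length : Int) - 1) = ((ys.length : Nat) : Int) := by
      simp
    have hlen2 : (y :: ys).length - 1 = ys.length := by simp
    rw [hlen, PySem.List.pyRange_zero_natCast, List.foldl_map, pv_zip_eq, hlen2, List.foldl_map]

-- ---- the strict-'>' running argmax and its dedup-invariance ----

def pvStep (k : List Int → Int) (b t : List Int) : List Int := if k b < k t then t else b

lemma pv_max?_cons (k : List Int → Int) :
    ∀ (us : List (List Int)) (m : List Int),
      PySem.List.max? (m :: us) k = some (us.foldl (pvStep k) m) := by
  intro us
  induction us with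
  | nil => intro m; simp [PySem.List.max?]
  | cons u us ih =>
    intro m
    have hstep : PySem.List.max? (m :: u :: us) k = PySem.List.max? (pvStep k m u :: us) k := by
      unfold pvStep
      by_cases h : k m < k u <;> simp [PySem.List.max?, h]
    rw [hstep, ih, List.foldl_cons]

lemma pv_maxD_cons (k : List Int → Int) (us : List (List Int)) (m d : List Int) :
    PySem.List.maxD (m :: us) k d = us.foldl (pvStep k) m := by
  rw [PySem.List.maxD, pv_max?_cons]
  rfl

lemma pv_le_step (k : List Int → Int) (b t : List Int) : k b ≤ k (pvStep k b t) := by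
  unfold pvStep
  split_ifs with h
  · exact le_of_lt h
  · exact le_refl _

def pvFilterSeen (S : List (List Int)) : List (List Int) → List (List Int)
  | [] => []
  | t :: us => if t ∈ S then pvFilterSeen S us else t :: pvFilterSeen (S ++ [t]) us

lemma pv_fold_dedup (k : List Int → Int) :
    ∀ (us S : List (List Int)) (b : List Int), (∀ x ∈ S, k x ≤ k b) →
      us.foldl (pvStep k) b = (pvFilterSeen S us).foldl (pvStep k) b := by
  intro us
  induction us with
  | nil => intro S b _; rfl
  | cons t us ih =>
    intro S b hS
    rw [pvFilterSeen]
    by_cases h : t ∈ S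
    · rw [if_pos h, List.foldl_cons]
      have hb : pvStep k b t = b := by
        unfold pvStep
        rw [if_neg (not_lt.mpr (hS t h))]
      rw [hb]
      exact ih S b hS
    · rw [if_neg h, List.foldl_cons, List.foldl_cons]
      apply ih
      intro x hx
      rcases List.mem_append.mp hx with hx | hx
      · exact le_trans (hS x hx) (pv_le_step k b t)
      · rw [List.mem_singleton.mp hx]
        unfold pvStep
        split_ifs with hlt
        · exact le_refl _
        · exact not_lt.mp hlt

lemma pv_update_eq_filterSeen :
    ∀ (us S : List (List Int)), PySem.Set.update S us = S ++ pvFilterSeen S us := by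
  intro us
  induction us with
  | nil => intro S; rw [PySem.Set.update_nil, pvFilterSeen, List.append_nil]
  | cons t us ih =>
    intro S
    rw [PySem.Set.update_cons, pvFilterSeen]
    by_cases h : t ∈ S
    · rw [if_pos h]
      have : PySem.Set.add S t = S := by
        rw [PySem.Set.add, if_pos ((PySem.Set.contains_iff S t).mpr h)]
      rw [this, ih]
    · rw [if_neg h]
      have : PySem.Set.add S t = S ++ [t] := by
        rw [PySem.Set.add, if_neg (fun hc => h ((PySem.Set.contains_iff S t).mp hc))]
      rw [this, ih, List.append_assoc]
      rfl

lemma pv_ofList_cons (h : List Int) (tl : List (List Int)) :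
    PySem.Set.ofList (h :: tl) = h :: pvFilterSeen [h] tl := by
  rw [PySem.Set.ofList_eq_foldl, List.foldl_cons]
  have h1 : PySem.Set.add ([] : PySem.Set (List Int)) h = [h] := rfl
  rw [h1]
  have h2 : List.foldl PySem.Set.add [h] tl = PySem.Set.update [h] tl := rfl
  rw [h2, pv_update_eq_filterSeen]
  rfl

-- the first maximal element over the DISTINCT successors is the strict-'>' running argmax
-- over the successor list WITH duplicates
lemma pv_maxD_dedup (k : List Int → Int) (h : List Int) (tl : List (List Int)) :
    PySem.List.maxD (PySem.Set.ofList (h :: tl)) k [] = tl.foldl (pvStep k) h := by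
  rw [pv_ofList_cons, pv_maxD_cons]
  exact (pv_fold_dedup k tl [h] h (by intro x hx; rw [List.mem_singleton.mp hx])).symm

-- ---- B's outer loop: first-sight insertion over the from-states ----

lemma pvB_items (g : List Int → List Int) :
    ∀ (ks : List (List Int)),
      ((ks.foldl (fun m f => if m.contains f then m else m.insert f (g f))
          (PySem.Dict.empty : PySem.Dict (List Int) (List Int))).items)
        = (PySem.Set.ofList ks).map (fun f => (f, g f)) := by
  intro ks
  induction ks using List.reverseRecOn with
  | nil => rfl
  | append_singleton ks f ih =>
    rw [List.foldl_append, List.foldl_cons, List.foldl_nil]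
    set M := ks.foldl (fun m f => if m.contains f then m else m.insert f (g f))
      (PySem.Dict.empty : PySem.Dict (List Int) (List Int)) with hM
    have hkeys : M.keys = PySem.Set.ofList ks := by
      show List.map (fun x => x.1) M.items = _
      rw [ih, List.map_map]
      rw [show ((fun (x : List Int × List Int) => x.1) ∘ fun f => (f, g f)) = id from rfl,
        List.map_id]
    have hcont : M.contains f = true ↔ f ∈ PySem.Set.ofList ks := by
      rw [PySem.Dict.contains_eq_decide_mem_keys, hkeys, decide_eq_true_iff]
    have hofl : PySem.Set.ofList (ks ++ [f]) = PySem.Set.add (PySem.Set.ofList ks) f := by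
      rw [PySem.Set.ofList_eq_foldl, PySem.Set.ofList_eq_foldl, List.foldl_append,
        List.foldl_cons, List.foldl_nil]
    by_cases hmem : f ∈ PySem.Set.ofList ks
    · rw [if_pos (hcont.mpr hmem), hofl, PySem.Set.add, if_pos ((PySem.Set.contains_iff _ _).mpr hmem), ih]
    · have hnc : M.contains f = false := by
        cases hc : M.contains f
        · rfl
        · exact absurd (hcont.mp hc) hmem
      rw [hnc]
      simp only [Bool.false_eq_true, if_false]
      rw [PySem.Dict.items_insert_of_not_contains _ _ hnc, ih, hofl, PySem.Set.add,
        if_neg (fun hc => hmem ((PySem.Set.contains_iff _ _).mp hc)), List.map_append]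
      rfl

-- ---- membership facts ----

lemma pvTos_ne_nil (ps : List (List Int × List Int)) (f : List Int)
    (h : f ∈ ps.map Prod.fst) : pvTos ps f ≠ [] := by
  obtain ⟨p, hp, rfl⟩ := List.mem_map.mp h
  intro hc
  have : p.2 ∈ pvTos ps p.1 := by
    rw [pvTos, List.mem_filterMap]
    exact ⟨p, hp, by simp⟩
  rw [hc] at this
  exact List.not_mem_nil this

-- ---- main equality ----

lemma pv_main (xs : List (List Int)) :
    generate_transition_matrix xs = generate_transition_matrix_alt xs := by
  have hslice : PySem.List.slice xs (some 1) none = xs.drop 1 :=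
    PySem.List.slice_from xs (a := 1) (by norm_num)
  simp only [generate_transition_matrix, generate_transition_matrix_alt, hslice]
  set ps := xs.zip (xs.drop 1) with hps
  -- A's counting loop over indices is the loop over consecutive pairs
  have hA' : (PySem.List.pyRange 0 ((xs.length : Int) - 1)).foldl
      (fun d i => d.modify (PySem.List.pyGetD xs i []) PySem.Dict.empty
        (fun inner => inner.modify (PySem.List.pyGetD xs (i + 1) []) 0 (· + 1)))
      PySem.Dict.empty
      = ps.foldl pvNestedStep PySem.Dict.empty := pv_pairs_loop xs pvNestedStep PySem.Dict.empty
  rw [hA', pvNested_items]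
  -- A's formatting loop inserts distinct fresh keys
  have hfresh : (((PySem.Set.ofList (ps.map Prod.fst)).map
        (fun f => (f, PySem.Dict.counter (pvTos ps f)))).foldl
      (fun m p => m.insert p.1 (PySem.List.maxD p.2.keys (fun t => p.2.getD t 0) []))
      PySem.Dict.empty).items
      = (PySem.Dict.empty : PySem.Dict (List Int) (List Int)).items
        ++ ((PySem.Set.ofList (ps.map Prod.fst)).map
            (fun f => (f, PySem.Dict.counter (pvTos ps f)))).map
          (fun a => (a.1, PySem.List.maxD a.2.keys (fun t => a.2.getD t 0) [])) := by
    apply PySem.Dict.items_foldl_insert_fresh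
    · intro a _; exact PySem.Dict.contains_empty a.1
    · rw [List.map_map,
        show ((fun (p : List Int × PySem.Dict (List Int) Int) => p.1)
          ∘ fun f => (f, PySem.Dict.counter (pvTos ps f))) = id from rfl, List.map_id]
      exact PySem.Set.nodup_ofList _
  rw [hfresh, List.map_map]
  -- B's loop over pairs only reads the from-state, so it is a loop over the from-states
  have hB : ps.foldl
      (fun (m : PySem.Dict (List Int) (List Int)) p =>
        if m.contains p.1 then m
        else
          m.insert p.1
            ((PySem.List.slice (ps.filterMap (fun q => if q.1 = p.1 then some q.2 else none))
                (some 1) none).foldl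
              (fun b t =>
                if PySem.List.count (ps.filterMap (fun q => if q.1 = p.1 then some q.2 else none)) b
                    < PySem.List.count (ps.filterMap (fun q => if q.1 = p.1 then some q.2 else none)) t
                then t else b)
              (PySem.List.pyGetD (ps.filterMap (fun q => if q.1 = p.1 then some q.2 else none)) 0 [])))
      PySem.Dict.empty
      = (ps.map Prod.fst).foldl
        (fun (m : PySem.Dict (List Int) (List Int)) f =>
          if m.contains f then m
          else
            m.insert f
              ((PySem.List.slice (pvTos ps f) (some 1) none).foldl
                (fun b t =>
                  if PySem.List.count (pvTos ps f) b < PySem.List.count (pvTos ps f) t then t else b)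
                (PySem.List.pyGetD (pvTos ps f) 0 [])))
        PySem.Dict.empty := by
    rw [List.foldl_map]
    rfl
  rw [hB, pvB_items]
  -- pointwise: Python max over the distinct successors = the strict-'>' running argmax
  apply List.map_congr_left
  intro f hf
  have hfps : f ∈ ps.map Prod.fst := (PySem.Set.mem_ofList _ _).mp hf
  obtain ⟨h, tl, hsuccs⟩ : ∃ h tl, pvTos ps f = h :: tl := by
    cases hsx : pvTos ps f with
    | nil => exact absurd hsx (pvTos_ne_nil ps f hfps)
    | cons h tl => exact ⟨h, tl, rfl⟩
  have hkeyA : (PySem.Dict.counter (pvTos ps f)).keys = PySem.Set.ofList (pvTos ps f) :=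
    PySem.Dict.keys_counter _
  have hgetA : (fun t => (PySem.Dict.counter (pvTos ps f)).getD t 0)
      = fun t => (((pvTos ps f).count t : Nat) : Int) :=
    funext (fun t => PySem.Dict.getD_counter _ t)
  simp only [Function.comp_apply]
  have hhead : PySem.List.pyGetD (h :: tl) 0 [] = h := by
    simp [PySem.List.pyGetD]
  have htail : PySem.List.slice (h :: tl) (some 1) none = tl := by
    rw [PySem.List.slice_from _ (a := 1) (by norm_num)]
    rfl
  have hstep : (fun (b t : List Int) =>
        if PySem.List.count (h :: tl) b < PySem.List.count (h :: tl) t then t else b)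
      = pvStep (fun t => ((PySem.List.count (h :: tl) t : Nat) : Int)) := by
    funext b t
    unfold pvStep
    congr 1
    simp [PySem.List.count_eq]
  rw [hkeyA, hgetA, hsuccs, hhead, htail, hstep, ← pv_maxD_dedup]
  have hkeq : (fun (t : List Int) => ((List.count t (h :: tl) : Nat) : Int))
      = fun t => ((PySem.List.count (h :: tl) t : Nat) : Int) := by
    funext t
    rw [PySem.List.count_eq]
  rw [hkeq]

-- ===== VERDICT (by name: the statement is the Claim_ definition above) =====
theorem generate_transition_matrix_spec : Claim_equal_generate_transition_matrix := by
  intro xs _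
  exact pv_main xs
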